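-- pv_equiv track=rewrite | github.com/devangpunatar/LeetCode | 2787-movement-of-robots/movement-of-robots.py | sumDistance
-- ===== SOURCE A (Python) =====
-- def sumDistance(nums, s, d):
--     MOD = 10**9 + 7
--     n = len(nums)
--     final_positions = []
--
--     for i in range(n):
--         if s[i] == 'L':
--             final_positions.append(nums[i] - d)
--         else:
--             final_positions.append(nums[i] + d)
--
--     final_positions.sort()
--
--     # Efficiently compute sum of pairwise distances using prefix sum trick
--     prefix_sum = 0
--     result = 0
--     for i in range(n):
--         result = (result + (final_positions[i] * i - prefix_sum)) % MOD
--         prefix_sum = (prefix_sum + final_positions[i]) % MOD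
--
--     return result
-- ===== SOURCE B (Python) =====
-- def _solve(a):
--     # divide and conquer: returns (sum of pairwise distances within a, a in sorted order)
--     if len(a) <= 1:
--         return 0, a
--     m = len(a) // 2
--     ls, left = _solve(a[:m])
--     rs, right = _solve(a[m:])
--     cross = 0
--     merged = []
--     i, j = 0, 0
--     lsum, rsum = sum(left), sum(right)
--     while i < len(left) and j < len(right):
--         if left[i] <= right[j]:
--             cross += rsum - left[i] * (len(right) - j)
--             lsum -= left[i]
--             merged.append(left[i])
--             i += 1
--         else:
--             cross += lsum - right[j] * (len(left) - i)
--             rsum -= right[j]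
--             merged.append(right[j])
--             j += 1
--     merged.extend(left[i:])
--     merged.extend(right[j:])
--     return ls + rs + cross, merged
--
--
-- def sumDistance(nums, s, d):
--     MOD = 10**9 + 7
--     pos = [x - d if c == 'L' else x + d for x, c in zip(nums, s)]
--     total, _ = _solve(pos)
--     return total % MOD
-- ===== Notes on version B (the rewrite author's own statement) =====
-- stated objective: alternative
-- what changed: A sorts with the library sort and then runs a linear prefix-sum accumulator pass; B computes the pairwise-distance sum by a divide-and-conquer merge sort that accumulates each cross-pair contribution during the merge (no library sort, no prefix-sum pass), taking the modulus once at the end.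
import Mathlib
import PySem

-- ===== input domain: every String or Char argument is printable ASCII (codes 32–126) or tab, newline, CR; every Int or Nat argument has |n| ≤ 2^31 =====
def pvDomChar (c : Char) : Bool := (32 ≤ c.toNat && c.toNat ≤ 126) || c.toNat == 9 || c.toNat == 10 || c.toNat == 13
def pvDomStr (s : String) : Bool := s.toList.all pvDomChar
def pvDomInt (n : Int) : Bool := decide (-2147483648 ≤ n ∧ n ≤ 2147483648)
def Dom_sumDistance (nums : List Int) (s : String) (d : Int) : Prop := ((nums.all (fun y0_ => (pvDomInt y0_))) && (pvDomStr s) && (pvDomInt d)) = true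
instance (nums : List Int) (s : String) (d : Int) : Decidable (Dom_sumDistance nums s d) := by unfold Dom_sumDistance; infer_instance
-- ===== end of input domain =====

-- B replaces A's library-sort + prefix-sum accumulator pass by a divide-and-conquer merge sort
-- that accumulates the cross-pair distance contributions during each merge (objective: alternative).

-- ===== PORT A =====
def pvMOD : Int := 1000000007

def sumDistance (nums : List Int) (s : String) (d : Int) : Int :=
  let n : Int := nums.length
  let fp : List Int := (PySem.List.pyRange 0 n 1).foldl
    (fun acc i =>
      if (PySem.Str.pyGet? s i).getD ' ' == 'L' then acc ++ [PySem.List.pyGetD nums i 0 - d]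
      else acc ++ [PySem.List.pyGetD nums i 0 + d]) []
  let fps := PySem.List.sorted fp (fun x => x) false
  let st : Int × Int := (PySem.List.pyRange 0 n 1).foldl
    (fun (st : Int × Int) i =>
      (PySem.Int.mod (st.1 + (PySem.List.pyGetD fps i 0 * i - st.2)) pvMOD,
       PySem.Int.mod (st.2 + PySem.List.pyGetD fps i 0) pvMOD))
    (0, 0)
  st.1

-- ===== PORT B =====
-- the merge loop of _solve: merges two lists, accumulating cross-pair contributions;
-- lsum/rsum track the sum of the not-yet-emitted part of each side
def pvMergeLoop : List Int → List Int → Int → Int → Int × List Int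
  | [], r, _, _ => (0, r)
  | l, [], _, _ => (0, l)
  | x :: l, y :: r, lsum, rsum =>
    if x ≤ y then
      let res := pvMergeLoop l (y :: r) (lsum - x) rsum
      (rsum - x * ((r.length : Int) + 1) + res.1, x :: res.2)
    else
      let res := pvMergeLoop (x :: l) r lsum (rsum - y)
      (lsum - y * ((l.length : Int) + 1) + res.1, y :: res.2)
termination_by l r _ _ => l.length + r.length

-- _solve: (sum of pairwise distances within a, a in sorted order)
def pvSolve (a : List Int) : Int × List Int :=
  if _h : a.length ≤ 1 then (0, a)
  else
    let m := a.length / 2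
    let L := pvSolve (a.take m)
    let R := pvSolve (a.drop m)
    let c := pvMergeLoop L.2 R.2 L.2.sum R.2.sum
    (L.1 + R.1 + c.1, c.2)
termination_by a.length
decreasing_by
  · simp only [List.length_take]; omega
  · simp only [List.length_drop]; omega

def sumDistance_alt (nums : List Int) (s : String) (d : Int) : Int :=
  let pos := (nums.zip s.toList).map (fun xc => if xc.2 == 'L' then xc.1 - d else xc.1 + d)
  PySem.Int.mod (pvSolve pos).1 pvMOD

-- ===== PRECONDITION & SPEC =====
-- Pre_ excludes exactly the inputs with len(s) < len(nums), on which A raises IndexError.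
def Pre_sumDistance (nums : List Int) (s : String) (d : Int) : Prop :=
  nums.length ≤ s.toList.length
instance (nums : List Int) (s : String) (d : Int) : Decidable (Pre_sumDistance nums s d) := by
  unfold Pre_sumDistance; infer_instance

def pvWitness_sumDistance : List Int × String × Int := ([1, -3], "RL", 2)


def Spec_sumDistance (nums : List Int) (s : String) (d : Int) (out : Int) : Prop := out = sumDistance_alt nums s d
instance (nums : List Int) (s : String) (d : Int) (out : Int) : Decidable (Spec_sumDistance nums s d out) := by unfold Spec_sumDistance; infer_instance

-- ===== CLAIM (what is proved, stated in full; the proofs are below) =====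
def Claim_equal_sumDistance : Prop := ∀ (nums : List Int) (s : String) (d : Int), Dom_sumDistance nums s d → Pre_sumDistance nums s d → Spec_sumDistance nums s d (sumDistance nums s d)

-- ===== LEMMAS AND PROOFS =====

-- sum of pairwise distances, in list order (order-invariant; the common spec of both sides)
def pvPairAbs : List Int → Int
  | [] => 0
  | x :: xs => (xs.map (fun y => |x - y|)).sum + pvPairAbs xs

-- sum of distances across two lists
def pvCross (l r : List Int) : Int := (l.map (fun x => (r.map (fun y => |x - y|)).sum)).sum

lemma pvPairAbs_perm {l l' : List Int} (h : l.Perm l') : pvPairAbs l = pvPairAbs l' := by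
  induction h with
  | nil => rfl
  | cons x h ih => simp only [pvPairAbs, ih, (h.map _).sum_eq]
  | swap x y l =>
    simp only [pvPairAbs, List.map_cons, List.sum_cons]
    rw [abs_sub_comm]; ring
  | trans h1 h2 ih1 ih2 => exact ih1.trans ih2

lemma pvCross_perm_left {l l' : List Int} (r : List Int) (h : l.Perm l') :
    pvCross l r = pvCross l' r := (h.map _).sum_eq

lemma pvCross_perm_right (l : List Int) {r r' : List Int} (h : r.Perm r') :
    pvCross l r = pvCross l r' := by
  unfold pvCross
  congr 1
  exact List.map_congr_left (fun x _ => (h.map _).sum_eq)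

lemma pvCross_cons_left (x : Int) (l r : List Int) :
    pvCross (x :: l) r = (r.map (fun y => |x - y|)).sum + pvCross l r := by
  simp [pvCross]

lemma pvCross_cons_right (l : List Int) (y : Int) (r : List Int) :
    pvCross l (y :: r) = (l.map (fun x => |x - y|)).sum + pvCross l r := by
  induction l with
  | nil => simp [pvCross]
  | cons x l ih =>
    simp only [pvCross, List.map_cons, List.sum_cons] at *
    rw [ih]; ring

lemma pvPairAbs_append (l r : List Int) :
    pvPairAbs (l ++ r) = pvPairAbs l + pvPairAbs r + pvCross l r := by
  induction l with
  | nil => simp [pvPairAbs, pvCross]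
  | cons x l ih =>
    simp only [List.cons_append, pvPairAbs, List.map_append, List.sum_append, ih,
      pvCross, List.map_cons, List.sum_cons]
    ring

-- Σ_{y∈m} |x - y| when x is a lower bound of m
lemma pvAbsSum_lb {x : Int} {m : List Int} (h : ∀ z ∈ m, x ≤ z) :
    (m.map (fun y => |x - y|)).sum = m.sum - x * m.length := by
  induction m with
  | nil => simp
  | cons y m ih =>
    simp only [List.map_cons, List.sum_cons, List.length_cons]
    rw [ih (fun z hz => h z (List.mem_cons_of_mem _ hz)),
      abs_of_nonpos (by have := h y (List.mem_cons_self) ; omega)]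
    push_cast; ring

-- Σ_{x∈m} |x - y| when y is a lower bound of m
lemma pvAbsSum_lb' {y : Int} {m : List Int} (h : ∀ z ∈ m, y ≤ z) :
    (m.map (fun x => |x - y|)).sum = m.sum - y * m.length := by
  induction m with
  | nil => simp
  | cons x m ih =>
    simp only [List.map_cons, List.sum_cons, List.length_cons]
    rw [ih (fun z hz => h z (List.mem_cons_of_mem _ hz)),
      abs_of_nonneg (by have := h x (List.mem_cons_self) ; omega)]
    push_cast; ring

lemma pvMergeLoop_perm (l r : List Int) (ls rs : Int) :
    (pvMergeLoop l r ls rs).2.Perm (l ++ r) := by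
  fun_induction pvMergeLoop with
  | case1 r ls rs => simp
  | case2 l ls rs _ => simp
  | case3 x l y r lsum rsum hxy res ih =>
    simpa [pvMergeLoop, hxy, res] using ih.cons x
  | case4 x l y r lsum rsum hxy res ih =>
    have : (y :: (pvMergeLoop (x :: l) r lsum (rsum - y)).2).Perm (y :: (x :: l ++ r)) := ih.cons y
    exact this.trans (List.Perm.symm (List.perm_middle))

lemma pvMergeLoop_sorted {l r : List Int} (hl : l.Pairwise (· ≤ ·)) (hr : r.Pairwise (· ≤ ·))
    (ls rs : Int) : (pvMergeLoop l r ls rs).2.Pairwise (· ≤ ·) := by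
  fun_induction pvMergeLoop with
  | case1 r ls rs => simpa using hr
  | case2 l ls rs _ => simpa using hl
  | case3 x l y r lsum rsum hxy res ih =>
    simp only [res]
    refine List.pairwise_cons.2 ⟨?_, ih (List.pairwise_cons.1 hl).2 hr⟩
    intro z hz
    have hz' : z ∈ l ++ (y :: r) := (pvMergeLoop_perm l (y :: r) (lsum - x) rsum).mem_iff.1 hz
    rcases List.mem_append.1 hz' with h | h
    · exact (List.pairwise_cons.1 hl).1 z h
    · rcases List.mem_cons.1 h with rfl | h
      · exact hxy
      · exact le_trans hxy ((List.pairwise_cons.1 hr).1 z h)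
  | case4 x l y r lsum rsum hxy res ih =>
    simp only [res]
    refine List.pairwise_cons.2 ⟨?_, ih hl (List.pairwise_cons.1 hr).2⟩
    intro z hz
    have hz' : z ∈ (x :: l) ++ r := (pvMergeLoop_perm (x :: l) r lsum (rsum - y)).mem_iff.1 hz
    rcases List.mem_append.1 hz' with h | h
    · rcases List.mem_cons.1 h with rfl | h
      · omega
      · have := (List.pairwise_cons.1 hl).1 z h; omega
    · exact (List.pairwise_cons.1 hr).1 z h

lemma pvMergeLoop_cross : ∀ (l r : List Int) (ls rs : Int), ls = l.sum → rs = r.sum →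
    l.Pairwise (· ≤ ·) → r.Pairwise (· ≤ ·) → (pvMergeLoop l r ls rs).1 = pvCross l r := by
  intro l r ls rs
  fun_induction pvMergeLoop with
  | case1 r ls rs => intro _ _ _ _; simp [pvCross]
  | case2 l ls rs h => intro _ _ _ _; cases l <;> simp [pvCross]
  | case3 x l y r lsum rsum hxy res ih =>
    intro hls hrs hl hr
    simp only [res]
    have ih' := ih (by rw [hls, List.sum_cons]; ring) hrs (List.pairwise_cons.1 hl).2 hr
    rw [ih', pvCross_cons_left]
    have hlb : ∀ z ∈ y :: r, x ≤ z := by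
      intro z hz
      rcases List.mem_cons.1 hz with rfl | hz
      · exact hxy
      · exact le_trans hxy ((List.pairwise_cons.1 hr).1 z hz)
    rw [pvAbsSum_lb hlb, hrs]
    simp only [List.sum_cons, List.length_cons]
    push_cast; ring
  | case4 x l y r lsum rsum hxy res ih =>
    intro hls hrs hl hr
    simp only [res]
    have ih' := ih hls (by rw [hrs, List.sum_cons]; ring) hl (List.pairwise_cons.1 hr).2
    rw [ih', pvCross_cons_right]
    have hlb : ∀ z ∈ x :: l, y ≤ z := by
      intro z hz
      rcases List.mem_cons.1 hz with rfl | hz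
      · omega
      · have := (List.pairwise_cons.1 hl).1 z hz; omega
    rw [pvAbsSum_lb' hlb, hls]
    simp only [List.sum_cons, List.length_cons]
    push_cast; ring

lemma pvSolve_spec (a : List Int) :
    (pvSolve a).2.Perm a ∧ (pvSolve a).2.Pairwise (· ≤ ·) ∧ (pvSolve a).1 = pvPairAbs a := by
  fun_induction pvSolve with
  | case1 a h =>
    refine ⟨List.Perm.refl a, ?_, ?_⟩
    · match a with
      | [] => simp
      | [x] => simp
      | x :: y :: t => simp at h
    · match a with
      | [] => rfl
      | [x] => simp [pvPairAbs]
      | x :: y :: t => simp at h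
  | case2 a h m L R c ihL ihR =>
    obtain ⟨pL, sL, vL⟩ := ihL
    obtain ⟨pR, sR, vR⟩ := ihR
    refine ⟨?_, ?_, ?_⟩
    · exact ((pvMergeLoop_perm L.2 R.2 L.2.sum R.2.sum).trans
        ((pL.append pR).trans (by rw [List.take_append_drop])))
    · exact pvMergeLoop_sorted sL sR _ _
    · have hc : c.1 = pvCross L.2 R.2 :=
        pvMergeLoop_cross L.2 R.2 _ _ rfl rfl sL sR
      have hcc : pvCross L.2 R.2 = pvCross (a.take m) (a.drop m) := by
        rw [pvCross_perm_left _ pL, pvCross_perm_right _ pR]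
      have hpa := pvPairAbs_append (a.take m) (a.drop m)
      rw [List.take_append_drop] at hpa
      rw [hc, hcc, hpa, show L.1 = pvPairAbs (a.take m) from vL,
        show R.1 = pvPairAbs (a.drop m) from vR]

-- A's accumulator loop without the per-step mod reduction (proof device only).
def pvLoopU : List Int → Int → Int → Int → Int
  | [], r, _, _ => r
  | x :: xs, r, p, cnt => pvLoopU xs (r + (x * cnt - p)) (p + x) (cnt + 1)

-- A's mod-reduced loop computes pvLoopU's value reduced mod pvMOD.
lemma pvLoopA_mod (l : List Int) : ∀ (a r p : Int),
    ((PySem.List.enumerate l a).foldl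
      (fun (st : Int × Int) ix =>
        (PySem.Int.mod (st.1 + (ix.2 * ix.1 - st.2)) pvMOD,
         PySem.Int.mod (st.2 + ix.2) pvMOD))
      (PySem.Int.mod r pvMOD, PySem.Int.mod p pvMOD)).1
    = PySem.Int.mod (pvLoopU l r p a) pvMOD := by
  induction l with
  | nil => intro a r p; simp [PySem.List.enumerate_nil, pvLoopU]
  | cons x t ih =>
    intro a r p
    rw [PySem.List.enumerate_cons]
    simp only [List.foldl_cons]
    have h1 : PySem.Int.mod (PySem.Int.mod r pvMOD + (x * a - PySem.Int.mod p pvMOD)) pvMOD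
        = PySem.Int.mod (r + (x * a - p)) pvMOD := by
      simp only [pvMOD, PySem.Int.mod_eq_emod_of_pos (by norm_num : (0:Int) < 1000000007)]; omega
    have h2 : PySem.Int.mod (PySem.Int.mod p pvMOD + x) pvMOD = PySem.Int.mod (p + x) pvMOD := by
      simp only [pvMOD, PySem.Int.mod_eq_emod_of_pos (by norm_num : (0:Int) < 1000000007)]; omega
    rw [h1, h2, ih (a+1) (r + (x * a - p)) (p + x)]
    rfl

-- The exact integer identity: the prefix-sum loop equals the signed-coefficient sum.
lemma pvLoopU_closed (l : List Int) : ∀ (r p cnt : Int),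
    pvLoopU l r p cnt = r - l.length * p +
      ((PySem.List.enumerate l cnt).map
        (fun ip => ip.2 * (2 * ip.1 - (cnt + l.length - 1)))).sum := by
  induction l with
  | nil => intro r p cnt; simp [PySem.List.enumerate_nil, pvLoopU]
  | cons x t ih =>
    intro r p cnt
    rw [show pvLoopU (x :: t) r p cnt = pvLoopU t (r + (x * cnt - p)) (p + x) (cnt + 1) from rfl,
        ih, PySem.List.enumerate_cons]
    simp only [List.map_cons, List.sum_cons, List.length_cons]
    have hw : (cnt + 1 + (t.length : Int) - 1) = cnt + ((t.length : Int) + 1) - 1 := by ring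
    push_cast
    rw [hw]
    ring

-- generic signed-coefficient sum, shift of the constant coefficient
lemma pvEnumCoef_shift (l : List Int) : ∀ (cnt c : Int),
    ((PySem.List.enumerate l cnt).map (fun ip => ip.2 * (2 * ip.1 - (c - 1)))).sum
    = ((PySem.List.enumerate l cnt).map (fun ip => ip.2 * (2 * ip.1 - c))).sum + l.sum := by
  induction l with
  | nil => intro cnt c; simp [PySem.List.enumerate_nil]
  | cons x t ih =>
    intro cnt c
    rw [PySem.List.enumerate_cons]
    simp only [List.map_cons, List.sum_cons, ih (cnt+1) c]
    ring

-- on a sorted list the signed-coefficient sum is the sum of pairwise distances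
lemma pvCoef_sorted : ∀ (l : List Int), l.Pairwise (· ≤ ·) → ∀ (cnt : Int),
    ((PySem.List.enumerate l cnt).map (fun ip => ip.2 * (2 * ip.1 - (2 * cnt + l.length - 1)))).sum
    = pvPairAbs l := by
  intro l
  induction l with
  | nil => intro _ _; simp [PySem.List.enumerate_nil, pvPairAbs]
  | cons x t ih =>
    intro hs cnt
    rw [PySem.List.enumerate_cons]
    simp only [List.map_cons, List.sum_cons, List.length_cons]
    have hc : (2 * cnt + ((t.length : Int) + 1) - 1) = (2 * (cnt + 1) + (t.length : Int) - 1) - 1 := by ring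
    push_cast
    rw [hc, pvEnumCoef_shift, ih (List.pairwise_cons.1 hs).2 (cnt + 1)]
    rw [show pvPairAbs (x :: t) = (t.map (fun y => |x - y|)).sum + pvPairAbs t from rfl]
    rw [pvAbsSum_lb (List.pairwise_cons.1 hs).1]
    ring

theorem pv_main (nums : List Int) (s : String) (d : Int) (hpre : nums.length ≤ s.toList.length) :
    sumDistance nums s d = sumDistance_alt nums s d := by
  unfold sumDistance sumDistance_alt
  simp only []
  have hstep : (fun (acc : List Int) (i : Int) =>
      if (PySem.Str.pyGet? s i).getD ' ' == 'L' then acc ++ [PySem.List.pyGetD nums i 0 - d]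
      else acc ++ [PySem.List.pyGetD nums i 0 + d])
    = fun acc i => acc ++ [if (PySem.Str.pyGet? s i).getD ' ' == 'L'
        then PySem.List.pyGetD nums i 0 - d else PySem.List.pyGetD nums i 0 + d] := by
    funext acc i; split <;> rfl
  rw [hstep, PySem.List.foldl_append_singleton_eq_map]
  -- the list A builds equals B's zip-map list
  have hfp : (PySem.List.pyRange 0 (nums.length : Int) 1).map
      (fun i => if (PySem.Str.pyGet? s i).getD ' ' == 'L'
        then PySem.List.pyGetD nums i 0 - d else PySem.List.pyGetD nums i 0 + d)
    = (nums.zip s.toList).map (fun xc => if xc.2 == 'L' then xc.1 - d else xc.1 + d) := by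
    apply List.ext_getElem
    · simp only [List.length_map, PySem.List.length_pyRange_one, List.length_zip]; omega
    · intro k h1 h2
      have hk : k < nums.length := by
        simpa [PySem.List.length_pyRange_one] using h1
      have hks : k < s.toList.length := lt_of_lt_of_le hk hpre
      have hg : s.toList[k]?.getD ' ' = s.toList[k] := by
        rw [List.getElem?_eq_getElem hks]; rfl
      simp [PySem.List.getElem_pyRange_one, List.getElem_zip, hk,
        PySem.List.pyGetD_natCast, List.getD_eq_getElem?_getD, hg]
  rw [List.nil_append, hfp]
  set L := (nums.zip s.toList).map (fun xc => if xc.2 == 'L' then xc.1 - d else xc.1 + d) with hL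
  set pos := PySem.List.sorted L (fun x => x) false with hpos
  have hlen : pos.length = nums.length := by
    rw [hpos, PySem.List.length_sorted, hL, List.length_map, List.length_zip]
    omega
  -- A's second loop as a fold over enumerate pos
  have hA2 : (PySem.List.pyRange 0 (nums.length : Int) 1).foldl
      (fun (st : Int × Int) i =>
        (PySem.Int.mod (st.1 + (PySem.List.pyGetD pos i 0 * i - st.2)) pvMOD,
         PySem.Int.mod (st.2 + PySem.List.pyGetD pos i 0) pvMOD)) (0, 0)
    = (PySem.List.enumerate pos 0).foldl
      (fun (st : Int × Int) ix =>
        (PySem.Int.mod (st.1 + (ix.2 * ix.1 - st.2)) pvMOD,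
         PySem.Int.mod (st.2 + ix.2) pvMOD)) (0, 0) := by
    rw [PySem.List.enumerate_eq_map_pyRange pos 0, List.foldl_map]
    simp only [PySem.List.len]
    rw [hlen]
  rw [hA2]
  have h00 : ((0:Int), (0:Int)) = (PySem.Int.mod 0 pvMOD, PySem.Int.mod 0 pvMOD) := by decide
  rw [h00, pvLoopA_mod pos 0 0 0, pvLoopU_closed pos 0 0 0]
  -- both sides are the same integer, reduced mod pvMOD
  obtain ⟨hperm, hsort, hval⟩ := pvSolve_spec L
  have hco : ((PySem.List.enumerate pos 0).map
      (fun ip => ip.2 * (2 * ip.1 - (0 + (pos.length : Int) - 1)))).sum = pvPairAbs pos := by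
    have := pvCoef_sorted pos (by simpa using PySem.List.sorted_pairwise (xs := L) (key := fun x => x)) 0
    rw [show (2 * (0:Int) + (pos.length : Int) - 1) = 0 + (pos.length : Int) - 1 by ring] at this
    exact this
  rw [hco, hval, pvPairAbs_perm (show pos.Perm L from PySem.List.sorted_perm L (fun x => x) false)]
  norm_num

-- ===== VERDICT (by name: the statement is the Claim_ definition above) =====
theorem sumDistance_spec : Claim_equal_sumDistance := by
  intro nums s d _ hpre
  unfold Spec_sumDistance
  exact (pv_main nums s d hpre)
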